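-- pv_equiv track=rewrite | github.com/thuva4/Algorithms | algorithms/graph/topological-sort-parallel/python/topological_sort_parallel.py | topological_sort_parallel
-- ===== SOURCE A (Python) =====
-- from collections import deque
--
-- def topological_sort_parallel(data: list[int]) -> int:
--     n = data[0]
--     m = data[1]
--
--     adj = [[] for _ in range(n)]
--     indegree = [0] * n
--
--     idx = 2
--     for _ in range(m):
--         u, v = data[idx], data[idx + 1]
--         adj[u].append(v)
--         indegree[v] += 1
--         idx += 2
--
--     queue = deque()
--     for i in range(n):
--         if indegree[i] == 0:
--             queue.append(i)
--
--     rounds = 0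
--     processed = 0
--
--     while queue:
--         size = len(queue)
--         for _ in range(size):
--             node = queue.popleft()
--             processed += 1
--             for neighbor in adj[node]:
--                 indegree[neighbor] -= 1
--                 if indegree[neighbor] == 0:
--                     queue.append(neighbor)
--         rounds += 1
--
--     return rounds if processed == n else -1
-- ===== SOURCE B (Python) =====
-- def topological_sort_parallel(data: list[int]) -> int:
--     n = data[0]
--     m = data[1]
--     edges = [(data[2 + 2 * k], data[3 + 2 * k]) for k in range(m)]
--     alive = [True] * n
--     rounds = 0
--     while any(alive):
--         frontier = [i for i in range(n)
--                     if alive[i] and not any(alive[u] for u, v in edges if v == i)]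
--         if not frontier:
--             return -1
--         for i in frontier:
--             alive[i] = False
--         rounds += 1
--     return rounds
-- ===== Notes on version B (the rewrite author's own statement) =====
-- stated objective: simpler
-- what changed: Replaces Kahn's queue-based BFS layering (adjacency lists, indegree counters, per-round deque slices) by a fixpoint iteration over an alive-set: each round removes every alive node with no alive predecessor by rescanning the edge list, returning -1 when a round removes nothing.
-- outside the precondition, e.g. on topological_sort_parallel([2, 1, 0, -1]): A returns 2, B returns 1; on topological_sort_parallel([-1, 0]): A returns -1, B returns 0
import Mathlib
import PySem

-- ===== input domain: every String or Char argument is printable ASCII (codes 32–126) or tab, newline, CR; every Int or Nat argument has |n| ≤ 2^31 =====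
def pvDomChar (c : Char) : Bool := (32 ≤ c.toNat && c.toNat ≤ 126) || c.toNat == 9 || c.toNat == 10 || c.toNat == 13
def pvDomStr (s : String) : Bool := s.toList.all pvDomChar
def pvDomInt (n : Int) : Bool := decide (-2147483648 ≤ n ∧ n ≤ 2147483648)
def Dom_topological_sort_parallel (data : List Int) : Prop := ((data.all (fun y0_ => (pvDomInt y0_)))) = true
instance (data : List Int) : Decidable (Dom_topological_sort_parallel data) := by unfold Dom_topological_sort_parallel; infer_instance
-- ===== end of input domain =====

-- B replaces A's queue-based BFS layering by a plain fixpoint iteration over an alive-set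
-- (each round removes every alive node with no alive predecessor, rescanning the edge list);
-- objective: simpler (no adjacency lists, indegree counters or deque bookkeeping).

-- ===== PORT A =====
-- Python's lists adj/indegree are encoded as total functions Int → _ (exact on Pre_, where
-- every index Python uses is in range).
def apBuild (data : List Int) (m : Nat) : (Int → List Int) × (Int → Int) :=
  (List.range m).foldl
    (fun st k =>
      let u := data.getD (2 + 2 * k) 0
      let v := data.getD (3 + 2 * k) 0
      (fun i => if i = u then st.1 i ++ [v] else st.1 i,
       fun i => if i = v then st.2 i + 1 else st.2 i))
    (fun _ => [], fun _ => 0)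

-- body of Python's `for neighbor in adj[node]` loop
def apDec (st : List Int × (Int → Int)) (nb : Int) : List Int × (Int → Int) :=
  let ind2 : Int → Int := fun i => if i = nb then st.2 i - 1 else st.2 i
  if ind2 nb = 0 then (st.1 ++ [nb], ind2) else (st.1, ind2)

-- Python's inner `for _ in range(size)` loop (pops exactly `size` nodes; [] is unreachable)
def apInner (adj : Int → List Int) : Nat → List Int → (Int → Int) → Int → List Int × (Int → Int) × Int
  | 0, q, indeg, proc => (q, indeg, proc)
  | Nat.succ size, q, indeg, proc =>
    match q with
    | [] => ([], indeg, proc)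
    | node :: rest =>
      let st := (adj node).foldl apDec (rest, indeg)
      apInner adj size st.1 st.2 (proc + 1)

-- Python's `while queue` loop; the fuel n+1 is a totality guard only, never exhausted on Pre_
def apOuter (adj : Int → List Int) : Nat → List Int → (Int → Int) → Int → Int → Int × Int
  | 0, _, _, proc, rounds => (rounds, proc)
  | Nat.succ f, q, indeg, proc, rounds =>
    if q.isEmpty then (rounds, proc)
    else
      let st := apInner adj q.length q indeg proc
      apOuter adj f st.1 st.2.1 st.2.2 (rounds + 1)

def topological_sort_parallel (data : List Int) : Int :=
  let n := data.getD 0 0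
  let m := data.getD 1 0
  let st := apBuild data m.toNat
  let q0 := ((List.range n.toNat).filter (fun i : Nat => st.2 (i : Int) == 0)).map (fun i : Nat => (i : Int))
  let r := apOuter st.1 (n.toNat + 1) q0 st.2 0 0
  if r.2 = n then r.1 else -1

-- ===== PORT B =====
-- `for i in frontier: alive[i] = False`
def bpKill (alive : Int → Bool) (frontier : List Nat) : Int → Bool :=
  frontier.foldl (fun (al : Int → Bool) (i : Nat) => fun j => if j = (i : Int) then false else al j) alive

-- Python's `while any(alive)` loop; the fuel n+1 is a totality guard only (each round removes ≥ 1 node)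
def bpGo (n : Int) (edges : List (Int × Int)) : Nat → (Int → Bool) → Int → Int
  | 0, _, rounds => rounds
  | Nat.succ f, alive, rounds =>
    if (List.range n.toNat).any (fun i : Nat => alive (i : Int)) then
      let frontier := (List.range n.toNat).filter
        (fun i : Nat => alive (i : Int) && !(edges.any (fun e => e.2 == (i : Int) && alive e.1)))
      if frontier.isEmpty then -1
      else bpGo n edges f (bpKill alive frontier) (rounds + 1)
    else rounds

def topological_sort_parallel_alt (data : List Int) : Int :=
  let n := data.getD 0 0
  let m := data.getD 1 0
  let edges := (List.range m.toNat).map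
    (fun k => (data.getD (2 + 2 * k) 0, data.getD (3 + 2 * k) 0))
  bpGo n edges (n.toNat + 1) (fun i => decide (0 ≤ i ∧ i < n)) 0

-- ===== PRECONDITION & SPEC =====
-- Pre_ excludes inputs on which A raises an IndexError (data shorter than 2, or shorter than
-- the m declared edge pairs) and malformed inputs (n < 0, or an edge endpoint outside [0,n))
-- on which A's returned value rests on Python's accidental negative-index wraparound.
def Pre_topological_sort_parallel (data : List Int) : Prop :=
  2 ≤ data.length ∧ 0 ≤ data.getD 0 0 ∧
  (0 ≤ data.getD 1 0 → 2 + 2 * (data.getD 1 0) ≤ (data.length : Int)) ∧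
  ∀ k, k < (data.getD 1 0).toNat →
    (0 ≤ data.getD (2 + 2 * k) 0 ∧ data.getD (2 + 2 * k) 0 < data.getD 0 0 ∧
     0 ≤ data.getD (3 + 2 * k) 0 ∧ data.getD (3 + 2 * k) 0 < data.getD 0 0)
instance (data : List Int) : Decidable (Pre_topological_sort_parallel data) := by
  unfold Pre_topological_sort_parallel; infer_instance
def pvWitness_topological_sort_parallel : List Int := [2, 1, 0, 1]

def Spec_topological_sort_parallel (data : List Int) (out : Int) : Prop := out = topological_sort_parallel_alt data
instance (data : List Int) (out : Int) : Decidable (Spec_topological_sort_parallel data out) := by unfold Spec_topological_sort_parallel; infer_instance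

-- ===== CLAIM (what is proved, stated in full; the proofs are below) =====
def Claim_equal_topological_sort_parallel : Prop := ∀ (data : List Int), Dom_topological_sort_parallel data → Pre_topological_sort_parallel data → Spec_topological_sort_parallel data (topological_sort_parallel data)

-- ===== LEMMAS AND PROOFS =====

-- the edge list both ports read off `data`
def edgesOf (data : List Int) (M : Nat) : List (Int × Int) :=
  (List.range M).map (fun k => (data.getD (2 + 2 * k) 0, data.getD (3 + 2 * k) 0))

-- number of edges into v whose source is not yet in D
def inCnt (E : List (Int × Int)) (D : Int → Bool) (v : Int) : Nat :=
  E.countP (fun e => e.2 == v && !D e.1)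

-- adjacency list of u
def adjOf (E : List (Int × Int)) (u : Int) : List Int :=
  (E.filter (fun e => e.1 == u)).map (fun e => e.2)

def setT (D : Int → Bool) (u : Int) : Int → Bool := fun i => if i = u then true else D i

def DU (D : Int → Bool) (S : List Int) : Int → Bool := fun v => D v || decide (v ∈ S)

def cardD (n : Int) (D : Int → Bool) : Nat := (List.range n.toNat).countP (fun i : Nat => D (i : Int))

-- per-edge step of apBuild, on the edge pair
def bstep (st : (Int → List Int) × (Int → Int)) (e : Int × Int) : (Int → List Int) × (Int → Int) :=
  (fun i => if i = e.1 then st.1 i ++ [e.2] else st.1 i,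
   fun i => if i = e.2 then st.2 i + 1 else st.2 i)

lemma countP_eqc {α : Type} (l : List α) (p q : α → Bool) (h : ∀ a ∈ l, p a = q a) :
    l.countP p = l.countP q :=
  List.countP_congr (fun a ha => by rw [h a ha])

lemma inCnt_congr (E : List (Int × Int)) (D D' : Int → Bool) (h : ∀ i, D i = D' i) (v : Int) :
    inCnt E D v = inCnt E D' v := by
  unfold inCnt
  apply countP_eqc
  intro e _
  rw [h e.1]

lemma cardD_congr (n : Int) (D D' : Int → Bool) (h : ∀ i, D i = D' i) :
    cardD n D = cardD n D' := by
  unfold cardD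
  apply countP_eqc
  intro i _
  rw [h ((i : Nat) : Int)]

lemma adjOf_cons (a b u : Int) (E : List (Int × Int)) :
    adjOf ((a, b) :: E) u = if a = u then b :: adjOf E u else adjOf E u := by
  unfold adjOf
  rw [List.filter_cons]
  by_cases h : a = u <;> simp [h]

lemma inCnt_split (E : List (Int × Int)) (D : Int → Bool) (u : Int) (hDu : D u = false) (v : Int) :
    inCnt E D v = (adjOf E u).count v + inCnt E (setT D u) v := by
  induction E with
  | nil => simp [inCnt, adjOf]
  | cons e E ih =>
    obtain ⟨a, b⟩ := e
    rw [adjOf_cons]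
    by_cases ha : a = u <;> by_cases hb : b = v <;>
      simp only [inCnt, List.countP_cons, List.count_cons, ha, hb, setT, hDu, if_true,
        if_false, beq_iff_eq] at ih ⊢ <;>
      simp [ha, hb, hDu] at * <;> omega

lemma inCnt_pos_mem (E : List (Int × Int)) (D : Int → Bool) (v : Int) (h : 0 < inCnt E D v) :
    ∃ e ∈ E, e.2 = v := by
  unfold inCnt at h
  rw [List.countP_pos_iff] at h
  obtain ⟨e, he, hp⟩ := h
  refine ⟨e, he, ?_⟩
  simp only [Bool.and_eq_true, beq_iff_eq] at hp
  exact hp.1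

lemma cardD_le (n : Int) (D : Int → Bool) : cardD n D ≤ n.toNat := by
  unfold cardD
  calc (List.range n.toNat).countP (fun i : Nat => D (i : Int)) ≤ (List.range n.toNat).length :=
      List.countP_le_length
    _ = n.toNat := List.length_range

lemma cardD_setT (n u : Int) (D : Int → Bool) (h0 : 0 ≤ u) (h1 : u < n) (hDu : D u = false) :
    cardD n (setT D u) = cardD n D + 1 := by
  have hcast : ((u.toNat : Nat) : Int) = u := by omega
  have hmem : u.toNat ∈ List.range n.toNat := by
    rw [List.mem_range]; omega
  unfold cardD
  have key : ∀ l : List Nat, l.Nodup → u.toNat ∈ l →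
      l.countP (fun i : Nat => setT D u (i : Int)) = l.countP (fun i : Nat => D (i : Int)) + 1 := by
    intro l
    induction l with
    | nil => intro _ h; simp at h
    | cons a t ih =>
      intro hnd hmem'
      rw [List.nodup_cons] at hnd
      rcases List.mem_cons.mp hmem' with h | h
      · subst h
        have ht : ∀ i ∈ t, (fun i : Nat => setT D u (i : Int)) i = (fun i : Nat => D (i : Int)) i := by
          intro i hi
          have hne : (i : Int) ≠ u := by
            intro hc
            have : i = u.toNat := by omega
            exact hnd.1 (this ▸ hi)
          simp [setT, hne]
        rw [List.countP_cons, List.countP_cons, countP_eqc t _ _ ht]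
        have h1 : setT D u ((u.toNat : Nat) : Int) = true := by rw [hcast]; simp [setT]
        have h2 : D ((u.toNat : Nat) : Int) = false := by rw [hcast]; exact hDu
        simp only [h1, h2]
        simp
      · have ha : a ≠ u.toNat := by
          intro hc
          exact hnd.1 (hc ▸ h)
        rw [List.countP_cons, List.countP_cons, ih hnd.2 h]
        have hne : (a : Int) ≠ u := by intro hc; exact ha (by omega)
        have : setT D u ((a : Nat) : Int) = D ((a : Nat) : Int) := by simp [setT, hne]
        rw [this]
        omega
  exact key _ (List.nodup_range) hmem

lemma cardD_DU (n : Int) : ∀ (q : List Int) (D : Int → Bool), q.Nodup →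
    (∀ v ∈ q, D v = false) → (∀ v ∈ q, 0 ≤ v ∧ v < n) →
    cardD n (DU D q) = cardD n D + q.length := by
  intro q
  induction q with
  | nil =>
    intro D _ _ _
    rw [cardD_congr n (DU D []) D (by intro v; simp [DU])]
    simp
  | cons u q' ih =>
    intro D hnd hD hr
    rw [List.nodup_cons] at hnd
    have hpoint : ∀ v, DU D (u :: q') v = DU (setT D u) q' v := by
      intro v
      by_cases hv : v = u <;> by_cases hm : v ∈ q' <;>
        simp [DU, setT, hv, hm]
    rw [cardD_congr n _ _ hpoint]
    have hr0 := hr u (List.mem_cons_self)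
    rw [ih (setT D u) hnd.2
      (by intro v hv
          have hv' := hD v (List.mem_cons_of_mem _ hv)
          have hne : v ≠ u := by intro hc; exact hnd.1 (hc ▸ hv)
          simp [setT, hne, hv'])
      (by intro v hv; exact hr v (List.mem_cons_of_mem _ hv)),
      cardD_setT n u D hr0.1 hr0.2 (hD u (List.mem_cons_self))]
    simp
    omega

lemma apBuild_eq (data : List Int) (M : Nat) :
    apBuild data M = (edgesOf data M).foldl bstep (fun _ => [], fun _ => 0) := by
  unfold apBuild edgesOf bstep
  rw [List.foldl_map]

lemma build_fold (E : List (Int × Int)) :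
    ∀ (st : (Int → List Int) × (Int → Int)),
      (∀ u, (E.foldl bstep st).1 u = st.1 u ++ adjOf E u) ∧
      (∀ v, (E.foldl bstep st).2 v = st.2 v + (inCnt E (fun _ => false) v : Int)) := by
  induction E with
  | nil => intro st; constructor <;> intro x <;> simp [adjOf, inCnt]
  | cons e E ih =>
    intro st
    obtain ⟨a, b⟩ := e
    rw [List.foldl_cons]
    obtain ⟨ih1, ih2⟩ := ih (bstep st (a, b))
    constructor
    · intro u
      rw [ih1 u, adjOf_cons]
      rcases eq_or_ne a u with h | h
      · simp [bstep, h]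
      · simp [bstep, h, Ne.symm h]
    · intro v
      rw [ih2 v]
      simp only [inCnt, List.countP_cons]
      rcases eq_or_ne b v with h | h
      · simp only [bstep, h, if_true, beq_self_eq_true, Bool.not_false, Bool.and_true]
        push_cast
        ring
      · simp [bstep, h, Ne.symm h]

lemma bpKill_eq (L : List Nat) : ∀ (alive : Int → Bool) (v : Int),
    bpKill alive L v = (alive v && !decide (v ∈ L.map (fun i : Nat => (i : Int)))) := by
  induction L with
  | nil => intro alive v; simp [bpKill]
  | cons i L ih =>
    intro alive v
    simp only [bpKill, List.foldl_cons] at *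
    rw [ih]
    by_cases h : v = (i : Int) <;> simp [h]

lemma fold_adj (E : List (Int × Int)) (u : Int) (D : Int → Bool) (hDu : D u = false)
    (rest : List Int) :
    ∀ (L P app : List Int) (indeg : Int → Int),
      P ++ L = adjOf E u →
      (∀ v, indeg v = (inCnt E D v : Int) - P.count v) →
      app.Nodup →
      (∀ v, v ∈ app ↔ (P.count v = inCnt E D v ∧ 1 ≤ P.count v)) →
      ∃ app' : List Int,
        (L.foldl apDec (rest ++ app, indeg)).1 = rest ++ app' ∧
        (∀ v, (L.foldl apDec (rest ++ app, indeg)).2 v = (inCnt E D v : Int) - (P ++ L).count v) ∧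
        app'.Nodup ∧
        (∀ v, v ∈ app' ↔ ((P ++ L).count v = inCnt E D v ∧ 1 ≤ (P ++ L).count v)) := by
  intro L
  induction L with
  | nil =>
    intro P app indeg hPL hind hnod hmem
    refine ⟨app, rfl, ?_, hnod, ?_⟩
    · intro v; simpa using hind v
    · intro v; simpa using hmem v
  | cons nb L₁ ih =>
    intro P app indeg hPL hind hnod hmem
    have hsplit := inCnt_split E D u hDu
    have hcount_adj : (adjOf E u).count nb = P.count nb + 1 + L₁.count nb := by
      rw [← hPL]; simp [List.count_append]; omega
    have hc : P.count nb + 1 ≤ inCnt E D nb := by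
      have := hsplit nb; omega
    have hassoc : (P ++ [nb]) ++ L₁ = P ++ nb :: L₁ := by simp
    have hPL' : (P ++ [nb]) ++ L₁ = adjOf E u := by rw [hassoc]; exact hPL
    have hind' : ∀ v, (fun i => if i = nb then indeg i - 1 else indeg i) v
        = (inCnt E D v : Int) - ((P ++ [nb]).count v : Int) := by
      intro v
      rcases eq_or_ne v nb with h | h
      · subst h
        simp only [if_true, List.count_append, List.count_cons, List.count_nil]
        have := hind v
        simp
        omega
      · simp only [h, if_false, List.count_append, List.count_cons, List.count_nil]
        have := hind v
        have hne : ¬(nb = v) := fun hc => h hc.symm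
        simp [hne]
        omega
    have hnbapp : nb ∉ app := by
      intro hmemnb
      have := (hmem nb).mp hmemnb
      omega
    rw [List.foldl_cons]
    have hiv : indeg nb = (inCnt E D nb : Int) - P.count nb := hind nb
    by_cases hz : indeg nb - 1 = 0
    · have hstep : apDec (rest ++ app, indeg) nb
          = (rest ++ (app ++ [nb]), fun i => if i = nb then indeg i - 1 else indeg i) := by
        simp only [apDec]
        rw [if_pos (by simpa using hz)]
        simp
      rw [hstep]
      have hnod' : (app ++ [nb]).Nodup :=
        List.Nodup.append hnod (List.nodup_singleton _)
          (fun a ha hb => by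
            simp only [List.mem_singleton] at hb
            exact hnbapp (hb ▸ ha))
      have hczero : P.count nb + 1 = inCnt E D nb := by omega
      have hmem' : ∀ v, v ∈ app ++ [nb] ↔
          (((P ++ [nb]).count v = inCnt E D v) ∧ 1 ≤ (P ++ [nb]).count v) := by
        intro v
        rcases eq_or_ne v nb with h | h
        · subst h
          have hcnt : (P ++ [v]).count v = P.count v + 1 := by
            simp [List.count_append]
          rw [hcnt]
          refine iff_of_true (by simp) ⟨by omega, by omega⟩
        · have hcnt : (P ++ [nb]).count v = P.count v := by
            simp [List.count_append, Ne.symm h]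
          rw [hcnt]
          constructor
          · intro hv
            rcases List.mem_append.mp hv with hv | hv
            · exact (hmem v).mp hv
            · exact absurd (List.mem_singleton.mp hv) h
          · intro hv
            exact List.mem_append.mpr (Or.inl ((hmem v).mpr hv))
      obtain ⟨app', h1, h2, h3, h4⟩ := ih (P ++ [nb]) (app ++ [nb]) _ hPL' hind' hnod' hmem'
      refine ⟨app', h1, ?_, h3, ?_⟩
      · intro v; rw [h2 v, hassoc]
      · intro v; rw [h4 v, hassoc]
    · have hstep : apDec (rest ++ app, indeg) nb
          = (rest ++ app, fun i => if i = nb then indeg i - 1 else indeg i) := by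
        simp only [apDec]
        rw [if_neg (by simpa using hz)]
      rw [hstep]
      have hcne : P.count nb + 1 ≠ inCnt E D nb := by
        intro hcz; apply hz; omega
      have hmem' : ∀ v, v ∈ app ↔
          (((P ++ [nb]).count v = inCnt E D v) ∧ 1 ≤ (P ++ [nb]).count v) := by
        intro v
        rcases eq_or_ne v nb with h | h
        · subst h
          have hcnt : (P ++ [v]).count v = P.count v + 1 := by
            simp [List.count_append]
          rw [hcnt]
          exact iff_of_false hnbapp (by omega)
        · have hcnt : (P ++ [nb]).count v = P.count v := by
            simp [List.count_append, Ne.symm h]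
          rw [hcnt]
          exact hmem v
      obtain ⟨app', h1, h2, h3, h4⟩ := ih (P ++ [nb]) app _ hPL' hind' hnod hmem'
      refine ⟨app', h1, ?_, h3, ?_⟩
      · intro v; rw [h2 v, hassoc]
      · intro v; rw [h4 v, hassoc]

lemma inCnt_setT_le (E : List (Int × Int)) (u : Int) (D : Int → Bool) (v : Int) :
    inCnt E (setT D u) v ≤ inCnt E D v := by
  apply List.countP_mono_left
  intro e _ h
  simp only [Bool.and_eq_true, Bool.not_eq_true'] at h ⊢
  refine ⟨h.1, ?_⟩
  have := h.2
  simp only [setT] at this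
  by_cases he : e.1 = u
  · rw [he] at this; simp at this
  · simpa [setT, he] using this

lemma inner_lemma (n : Int) (E : List (Int × Int)) (adj : Int → List Int)
    (hE : ∀ e ∈ E, 0 ≤ e.1 ∧ e.1 < n ∧ 0 ≤ e.2 ∧ e.2 < n)
    (hadj : ∀ u, adj u = adjOf E u) :
    ∀ (S acc : List Int) (D : Int → Bool) (indeg : Int → Int),
      (S ++ acc).Nodup →
      (∀ v ∈ S ++ acc, D v = false) →
      (∀ v, indeg v = (inCnt E D v : Int)) →
      (∀ v, (D v = true ∨ v ∈ S ++ acc) ↔ (0 ≤ v ∧ v < n ∧ inCnt E D v = 0)) →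
      ((apInner adj S.length (S ++ acc) indeg (cardD n D : Int)).1.Nodup) ∧
      (∀ v ∈ (apInner adj S.length (S ++ acc) indeg (cardD n D : Int)).1, DU D S v = false) ∧
      (∀ v, (apInner adj S.length (S ++ acc) indeg (cardD n D : Int)).2.1 v = (inCnt E (DU D S) v : Int)) ∧
      ((apInner adj S.length (S ++ acc) indeg (cardD n D : Int)).2.2 = (cardD n (DU D S) : Int)) ∧
      (∀ v, (DU D S v = true ∨ v ∈ (apInner adj S.length (S ++ acc) indeg (cardD n D : Int)).1) ↔
        (0 ≤ v ∧ v < n ∧ inCnt E (DU D S) v = 0)) := by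
  intro S
  induction S with
  | nil =>
    intro acc D indeg hnod hD hind hZ
    have hDU : ∀ v, DU D [] v = D v := by intro v; simp [DU]
    simp only [List.nil_append, List.length_nil, apInner]
    refine ⟨hnod, ?_, ?_, ?_, ?_⟩
    · intro v hv; rw [hDU v]; exact hD v hv
    · intro v; rw [inCnt_congr E (DU D []) D hDU v]; exact hind v
    · rw [cardD_congr n (DU D []) D hDU]
    · intro v; rw [hDU v, inCnt_congr E (DU D []) D hDU v]; exact hZ v
  | cons u S₁ ih =>
    intro acc D indeg hnod hD hind hZ
    have hDu : D u = false := hD u (by simp)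
    have hZu := (hZ u).mp (Or.inr (by simp))
    obtain ⟨hu0, hun, hcnt0⟩ := hZu
    -- run the fold over adj u
    have hPL : ([] : List Int) ++ adj u = adjOf E u := by simp [hadj]
    have hind0 : ∀ v, indeg v = (inCnt E D v : Int) - (([] : List Int).count v : Int) := by
      intro v; simpa using hind v
    obtain ⟨app, h1, h2, h3, h4⟩ :=
      fold_adj E u D hDu (S₁ ++ acc) (adj u) [] [] indeg hPL hind0 List.nodup_nil
        (by intro v; simp)
    simp only [List.append_nil] at h1 h2
    have hsplitu := inCnt_split E D u hDu
    set D₁ := setT D u with hD₁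
    have hadjcnt : ∀ v, (adj u).count v = (adjOf E u).count v := by
      intro v; rw [hadj]
    have hind₁ : ∀ v, ((adj u).foldl apDec (S₁ ++ acc, indeg)).2 v = (inCnt E D₁ v : Int) := by
      intro v
      rw [h2 v]
      have := hsplitu v
      have hcv : (([] : List Int) ++ adj u).count v = (adjOf E u).count v := by
        rw [hPL]
      rw [hcv]
      omega
    have happ : ∀ v, v ∈ app ↔ (inCnt E D₁ v = 0 ∧ 1 ≤ inCnt E D v) := by
      intro v
      rw [h4 v]
      have hs := hsplitu v
      have hcv : (([] : List Int) ++ adj u).count v = (adjOf E u).count v := by rw [hPL]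
      rw [hcv]
      omega
    -- properties of appended nodes
    have happ_not : ∀ v ∈ app, D v = false ∧ v ∉ (u :: (S₁ ++ acc)) ∧ (0 ≤ v ∧ v < n) := by
      intro v hv
      have hv' := (happ v).mp hv
      have hpos : 0 < inCnt E D v := by omega
      obtain ⟨e, he, hev⟩ := inCnt_pos_mem E D v hpos
      have hrange := hE e he
      have hnz : inCnt E D v ≠ 0 := by omega
      constructor
      · by_cases hDv : D v = true
        · exact absurd ((hZ v).mp (Or.inl hDv)).2.2 hnz
        · simpa using hDv
      constructor
      · intro hmem
        exact hnz ((hZ v).mp (Or.inr hmem)).2.2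
      · exact ⟨hev ▸ hrange.2.2.1, hev ▸ hrange.2.2.2⟩
    have hnod1 : (S₁ ++ acc).Nodup := (List.nodup_cons.mp hnod).2
    have hunotmem : u ∉ S₁ ++ acc := (List.nodup_cons.mp hnod).1
    have hnod' : (S₁ ++ (acc ++ app)).Nodup := by
      rw [← List.append_assoc]
      exact List.Nodup.append hnod1 h3
        (fun a ha hb => ((happ_not a hb).2.1 (List.mem_cons_of_mem _ ha)))
    have hD' : ∀ v ∈ S₁ ++ (acc ++ app), D₁ v = false := by
      intro v hv
      rw [← List.append_assoc] at hv
      rcases List.mem_append.mp hv with hv | hv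
      · have hvne : v ≠ u := by intro hc; exact hunotmem (hc ▸ hv)
        have := hD v (List.mem_cons_of_mem _ hv)
        simp [hD₁, setT, hvne, this]
      · have h := happ_not v hv
        have hvne : v ≠ u := by
          intro hc
          have := (happ v).mp hv
          rw [hc] at this
          omega
        simp [hD₁, setT, hvne, h.1]
    have hZ₁ : ∀ v, (D₁ v = true ∨ v ∈ S₁ ++ (acc ++ app)) ↔
        (0 ≤ v ∧ v < n ∧ inCnt E D₁ v = 0) := by
      intro v
      constructor
      · intro hv
        rcases hv with hv | hv
        · by_cases hvu : v = u
          · subst hvu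
            have hle : inCnt E D₁ v ≤ inCnt E D v := by
              rw [hD₁]; exact inCnt_setT_le E _ D v
            exact ⟨hu0, hun, by omega⟩
          · have hDv : D v = true := by simpa [hD₁, setT, hvu] using hv
            have := (hZ v).mp (Or.inl hDv)
            have hle : inCnt E D₁ v ≤ inCnt E D v := by
              rw [hD₁]; exact inCnt_setT_le E _ D v
            exact ⟨this.1, this.2.1, by omega⟩
        · rw [← List.append_assoc] at hv
          rcases List.mem_append.mp hv with hv | hv
          · have := (hZ v).mp (Or.inr (List.mem_cons_of_mem _ hv))
            have hle : inCnt E D₁ v ≤ inCnt E D v := by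
              rw [hD₁]; exact inCnt_setT_le E _ D v
            exact ⟨this.1, this.2.1, by omega⟩
          · have h := happ_not v hv
            have := (happ v).mp hv
            exact ⟨h.2.2.1, h.2.2.2, this.1⟩
      · rintro ⟨hv0, hvn, hvz⟩
        by_cases hc : inCnt E D v = 0
        · have := (hZ v).mpr ⟨hv0, hvn, hc⟩
          rcases this with hDv | hmem
          · left
            by_cases hvu : v = u <;> simp [hD₁, setT, hvu, hDv]
          · rcases List.mem_cons.mp hmem with hvu | hmem'
            · left; simp [hD₁, setT, hvu]
            · right
              rw [← List.append_assoc]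
              exact List.mem_append.mpr (Or.inl hmem')
        · right
          rw [← List.append_assoc]
          exact List.mem_append.mpr (Or.inr ((happ v).mpr ⟨hvz, by omega⟩))
    have hcard : (cardD n D : Int) + 1 = (cardD n D₁ : Int) := by
      rw [hD₁, cardD_setT n u D hu0 hun hDu]
      push_cast
      ring
    -- unfold one step of apInner
    have hstep : apInner adj (u :: S₁).length ((u :: S₁) ++ acc) indeg (cardD n D : Int)
        = apInner adj S₁.length (S₁ ++ (acc ++ app))
            ((adj u).foldl apDec (S₁ ++ acc, indeg)).2 (cardD n D₁ : Int) := by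
      have hq : (u :: S₁) ++ acc = u :: (S₁ ++ acc) := by simp
      rw [hq, List.length_cons]
      show apInner adj (S₁.length + 1) (u :: (S₁ ++ acc)) indeg (cardD n D : Int) = _
      rw [show (S₁.length + 1) = Nat.succ S₁.length from rfl]
      simp only [apInner]
      have hfold1 : ((adj u).foldl apDec (S₁ ++ acc, indeg)).1 = S₁ ++ (acc ++ app) := by
        rw [h1, List.append_assoc]
      rw [hfold1, hcard]
    obtain ⟨c1, c2, c3, c4, c5⟩ := ih (acc ++ app) D₁
      ((adj u).foldl apDec (S₁ ++ acc, indeg)).2 hnod' hD' hind₁ hZ₁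
    have hDUeq : ∀ v, DU D (u :: S₁) v = DU D₁ S₁ v := by
      intro v
      by_cases hv : v = u <;> by_cases hm : v ∈ S₁ <;>
        simp [DU, hD₁, setT, hv, hm]
    rw [hstep]
    refine ⟨c1, ?_, ?_, ?_, ?_⟩
    · intro v hv; rw [hDUeq v]; exact c2 v hv
    · intro v; rw [inCnt_congr E _ _ hDUeq v]; exact c3 v
    · rw [cardD_congr n _ _ hDUeq]; exact c4
    · intro v; rw [hDUeq v, inCnt_congr E _ _ hDUeq v]; exact c5 v

lemma lockstep (n : Int) (E : List (Int × Int)) (adj : Int → List Int)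
    (hn : 0 ≤ n)
    (hE : ∀ e ∈ E, 0 ≤ e.1 ∧ e.1 < n ∧ 0 ≤ e.2 ∧ e.2 < n)
    (hadj : ∀ u, adj u = adjOf E u) :
    ∀ (fuel : Nat) (D : Int → Bool) (q : List Int) (indeg : Int → Int) (alive : Int → Bool)
      (rounds : Int),
      (∀ v, indeg v = (inCnt E D v : Int)) →
      q.Nodup →
      (∀ v ∈ q, D v = false) →
      (∀ v, (D v = true ∨ v ∈ q) ↔ (0 ≤ v ∧ v < n ∧ inCnt E D v = 0)) →
      (∀ v, alive v = (decide (0 ≤ v ∧ v < n) && !D v)) →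
      n.toNat < cardD n D + fuel →
      (if (apOuter adj fuel q indeg (cardD n D : Int) rounds).2 = n
       then (apOuter adj fuel q indeg (cardD n D : Int) rounds).1 else -1)
        = bpGo n E fuel alive rounds := by
  intro fuel
  induction fuel with
  | zero =>
    intro D q indeg alive rounds hind hnd hqD hZ halive hfuel
    exfalso
    have := cardD_le n D
    omega
  | succ f ih =>
    intro D q indeg alive rounds hind hnd hqD hZ halive hfuel
    by_cases hq : q = []
    · subst hq
      simp only [apOuter, List.isEmpty_nil, if_true]
      simp only [bpGo]
      by_cases hall : ∀ i ∈ List.range n.toNat, D (i : Int) = true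
      · have hcard : cardD n D = n.toNat := by
          have h1 : (List.range n.toNat).countP (fun i : Nat => D (i : Int))
              = (List.range n.toNat).length :=
            List.countP_eq_length.mpr (by intro a ha; simpa using hall a ha)
          unfold cardD
          rw [h1, List.length_range]
        have hany : ((List.range n.toNat).any (fun i : Nat => alive (i : Int))) = false := by
          rw [List.any_eq_false]
          intro i hi
          rw [halive]
          simp [hall i hi]
        rw [hany]
        have hcn : (cardD n D : Int) = n := by omega
        simp [hcn]
      · push Not at hall
        obtain ⟨i0, hi0, hDi0⟩ := hall
        have hDi0' : D (i0 : Int) = false := by simpa using hDi0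
        have hcard_lt : cardD n D < n.toNat := by
          rcases Nat.lt_or_ge (cardD n D) n.toNat with h | h
          · exact h
          · exfalso
            have hle := cardD_le n D
            have heq : cardD n D = n.toNat := by omega
            unfold cardD at heq
            have h1 : (List.range n.toNat).countP (fun i : Nat => D (i : Int))
                = (List.range n.toNat).length := by
              rw [List.length_range]; exact heq
            exact hDi0 (by simpa using List.countP_eq_length.mp h1 i0 hi0)
        have hany : ((List.range n.toNat).any (fun i : Nat => alive (i : Int))) = true := by
          rw [List.any_eq_true]
          refine ⟨i0, hi0, ?_⟩
          rw [halive]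
          have : (i0 : Int) < n := by
            rw [List.mem_range] at hi0
            omega
          simp [hDi0', this]
        rw [hany]
        have hfempty : ((List.range n.toNat).filter
            (fun i : Nat => alive (i : Int) && !(E.any (fun e => e.2 == (i : Int) && alive e.1)))) = [] := by
          rw [List.filter_eq_nil_iff]
          intro i hi hcontra
          simp only [Bool.and_eq_true, Bool.not_eq_true'] at hcontra
          obtain ⟨halv, hpred⟩ := hcontra
          rw [halive] at halv
          simp only [Bool.and_eq_true, Bool.not_eq_true', decide_eq_true_eq] at halv
          have hiz : inCnt E D (i : Int) = 0 := by
            unfold inCnt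
            rw [List.countP_eq_zero]
            intro e he
            rw [List.any_eq_false] at hpred
            have := hpred e he
            by_cases hei : e.2 = (i : Int)
            · have he1 : alive e.1 = false := by
                rcases Bool.eq_false_or_eq_true (alive e.1) with h | h
                · exact absurd (by simp [hei, h]) this
                · exact h
              rw [halive] at he1
              have hrange := hE e he
              simp only [Bool.and_eq_false_iff, decide_eq_false_iff_not] at he1
              rcases he1 with h | h
              · exact absurd ⟨hrange.1, hrange.2.1⟩ h
              · simp [hei, h]
            · simp [hei]
          have := (hZ (i : Int)).mpr ⟨by omega, halv.1.2, hiz⟩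
          rcases this with h | h
          · rw [halv.2] at h; exact Bool.false_ne_true h
          · simp at h
        rw [hfempty]
        have hcn : ¬ ((cardD n D : Int) = n) := by omega
        simp [hcn]
    · -- a productive round
      obtain ⟨u, hu_mem⟩ : ∃ u, u ∈ q := by
        rcases q with _ | ⟨a, t⟩
        · exact absurd rfl hq
        · exact ⟨a, by simp⟩
      have hq_sub : ∀ v ∈ q, 0 ≤ v ∧ v < n := by
        intro v hv
        have := (hZ v).mp (Or.inr hv)
        exact ⟨this.1, this.2.1⟩
      obtain ⟨c1, c2, c3, c4, c5⟩ := inner_lemma n E adj hE hadj q [] D indeg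
        (by simpa) (by simpa using hqD) hind (by simpa using hZ)
      simp only [List.append_nil] at c1 c2 c3 c4 c5
      have hu_rng := hq_sub u hu_mem
      have hcastu : ((u.toNat : Nat) : Int) = u := by omega
      -- the frontier is exactly q (as a set of indices)
      have hfront : ∀ i ∈ List.range n.toNat,
          (alive (i : Int) && !(E.any (fun e => e.2 == (i : Int) && alive e.1)))
            = decide ((i : Int) ∈ q) := by
        intro i hi
        have hin : (i : Int) < n := by rw [List.mem_range] at hi; omega
        by_cases hmem : (i : Int) ∈ q
        · have hDf : D (i : Int) = false := hqD _ hmem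
          have hiz : inCnt E D (i : Int) = 0 := ((hZ _).mp (Or.inr hmem)).2.2
          have hpred : (E.any (fun e => e.2 == (i : Int) && alive e.1)) = false := by
            rw [List.any_eq_false]
            intro e he
            unfold inCnt at hiz
            rw [List.countP_eq_zero] at hiz
            have := hiz e he
            by_cases hei : e.2 = (i : Int)
            · have hDe : D e.1 = true := by
                rcases Bool.eq_false_or_eq_true (D e.1) with h | h
                · exact h
                · exact absurd (by simp [hei, h]) this
              rw [halive]
              simp [hei, hDe]
            · simp [hei]
          rw [halive, hpred]
          simp [hDf, hin, hmem]
        · simp only [hmem, decide_false]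
          by_cases hDi : D (i : Int) = true
          · rw [halive]
            simp [hDi]
          · have hDf : D (i : Int) = false := by simpa using hDi
            have hnz : inCnt E D (i : Int) ≠ 0 := by
              intro hz0
              rcases (hZ _).mpr ⟨by omega, hin, hz0⟩ with h | h
              · exact hDi h
              · exact hmem h
            have hpos : 0 < inCnt E D (i : Int) := Nat.pos_of_ne_zero hnz
            unfold inCnt at hpos
            rw [List.countP_pos_iff] at hpos
            obtain ⟨e, he, hee⟩ := hpos
            simp only [Bool.and_eq_true, beq_iff_eq, Bool.not_eq_true'] at hee
            have hrange := hE e he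
            have hany : (E.any (fun e => e.2 == (i : Int) && alive e.1)) = true := by
              rw [List.any_eq_true]
              refine ⟨e, he, ?_⟩
              rw [halive]
              simp [hee.1, hee.2, hrange.1, hrange.2.1]
            rw [hany]
            simp
      have hfeq : ((List.range n.toNat).filter
          (fun i : Nat => alive (i : Int) && !(E.any (fun e => e.2 == (i : Int) && alive e.1))))
          = (List.range n.toNat).filter (fun i : Nat => decide ((i : Int) ∈ q)) :=
        List.filter_congr hfront
      have hany2 : ((List.range n.toNat).any (fun i : Nat => alive (i : Int))) = true := by
        rw [List.any_eq_true]
        refine ⟨u.toNat, by rw [List.mem_range]; omega, ?_⟩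
        rw [hcastu, halive]
        simp [hqD u hu_mem, hu_rng.1, hu_rng.2]
      have hfne : ((List.range n.toNat).filter (fun i : Nat => decide ((i : Int) ∈ q))).isEmpty = false := by
        rw [List.isEmpty_eq_false_iff_exists_mem]
        refine ⟨u.toNat, ?_⟩
        rw [List.mem_filter, List.mem_range, hcastu]
        exact ⟨by omega, by simp [hu_mem]⟩
      have hmapmem : ∀ v : Int,
          (v ∈ ((List.range n.toNat).filter (fun i : Nat => decide ((i : Int) ∈ q))).map
            (fun i : Nat => (i : Int))) ↔ v ∈ q := by
        intro v
        constructor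
        · intro hv
          obtain ⟨i, hi, rfl⟩ := List.mem_map.mp hv
          rw [List.mem_filter] at hi
          exact of_decide_eq_true hi.2
        · intro hv
          have hr := hq_sub v hv
          refine List.mem_map.mpr ⟨v.toNat, ?_, by omega⟩
          rw [List.mem_filter, List.mem_range]
          have : ((v.toNat : Nat) : Int) = v := by omega
          rw [this]
          exact ⟨by omega, by simp [hv]⟩
      have halive' : ∀ v, bpKill alive
          ((List.range n.toNat).filter (fun i : Nat => decide ((i : Int) ∈ q))) v
          = (decide (0 ≤ v ∧ v < n) && !(DU D q v)) := by
        intro v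
        rw [bpKill_eq, halive]
        have : decide (v ∈ ((List.range n.toNat).filter
            (fun i : Nat => decide ((i : Int) ∈ q))).map (fun i : Nat => (i : Int)))
            = decide (v ∈ q) := by
          simp [hmapmem v]
        rw [this]
        simp only [DU]
        cases hD : D v <;> cases hm : decide (v ∈ q) <;> cases hr : decide (0 ≤ v ∧ v < n) <;> simp
      -- one outer step on each side
      have hqe : ¬ (q.isEmpty = true) := by
        simp [List.isEmpty_iff, hq]
      have hcardq : cardD n (DU D q) = cardD n D + q.length :=
        cardD_DU n q D hnd hqD hq_sub
      have hqlen : 1 ≤ q.length := by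
        rcases q with _ | ⟨a, t⟩
        · exact absurd rfl hq
        · simp
      have hAstep : apOuter adj (Nat.succ f) q indeg (cardD n D : Int) rounds
          = apOuter adj f (apInner adj q.length q indeg (cardD n D : Int)).1
              (apInner adj q.length q indeg (cardD n D : Int)).2.1
              (cardD n (DU D q) : Int) (rounds + 1) := by
        simp only [apOuter]
        rw [if_neg hqe, c4]
      have hBstep : bpGo n E (Nat.succ f) alive rounds
          = bpGo n E f (bpKill alive
              ((List.range n.toNat).filter (fun i : Nat => decide ((i : Int) ∈ q)))) (rounds + 1) := by
        simp only [bpGo]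
        rw [hfeq, hany2]
        simp only [if_true, hfne, Bool.false_eq_true, if_false]
      rw [hAstep, hBstep]
      exact ih (DU D q) (apInner adj q.length q indeg (cardD n D : Int)).1
        (apInner adj q.length q indeg (cardD n D : Int)).2.1
        (bpKill alive ((List.range n.toNat).filter (fun i : Nat => decide ((i : Int) ∈ q))))
        (rounds + 1) c3 c1 c2 c5 halive' (by omega)

-- ===== VERDICT (by name: the statement is the Claim_ definition above) =====
theorem topological_sort_parallel_spec : Claim_equal_topological_sort_parallel := by
  intro data _hdom hpre
  obtain ⟨hlen, hn0, hlen2, hbounds⟩ := hpre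
  unfold Spec_topological_sort_parallel topological_sort_parallel topological_sort_parallel_alt
  simp only []
  have hEdef : (List.range (data.getD 1 0).toNat).map
      (fun k => (data.getD (2 + 2 * k) 0, data.getD (3 + 2 * k) 0))
      = edgesOf data (data.getD 1 0).toNat := rfl
  rw [hEdef]
  set n := data.getD 0 0 with hn
  set M := (data.getD 1 0).toNat with hM
  set E := edgesOf data M with hEd
  have hE : ∀ e ∈ E, 0 ≤ e.1 ∧ e.1 < n ∧ 0 ≤ e.2 ∧ e.2 < n := by
    intro e he
    rw [hEd] at he
    unfold edgesOf at he
    obtain ⟨k, hk, rfl⟩ := List.mem_map.mp he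
    rw [List.mem_range] at hk
    have := hbounds k hk
    exact ⟨this.1, this.2.1, this.2.2.1, this.2.2.2⟩
  have hbuild := apBuild_eq data M
  rw [← hEd] at hbuild
  have hbf := build_fold E (fun _ => [], fun _ => 0)
  have hadj : ∀ u, (apBuild data M).1 u = adjOf E u := by
    intro u
    rw [hbuild]
    simpa using hbf.1 u
  have hind0 : ∀ v, (apBuild data M).2 v = (inCnt E (fun _ => false) v : Int) := by
    intro v
    rw [hbuild]
    simpa using hbf.2 v
  set Q := ((List.range n.toNat).filter (fun i : Nat => (apBuild data M).2 (i : Int) == 0)).map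
    (fun i : Nat => (i : Int)) with hQ
  have hnodQ : Q.Nodup := by
    rw [hQ]
    apply List.Nodup.map
    · intro a b hab
      simp only at hab
      exact_mod_cast hab
    · exact (List.nodup_range).filter _
  have hZ0 : ∀ v : Int, ((fun _ : Int => false) v = true ∨ v ∈ Q) ↔
      (0 ≤ v ∧ v < n ∧ inCnt E (fun _ => false) v = 0) := by
    intro v
    simp only [Bool.false_eq_true, false_or]
    constructor
    · intro hv
      rw [hQ] at hv
      obtain ⟨i, hi, rfl⟩ := List.mem_map.mp hv
      rw [List.mem_filter, List.mem_range] at hi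
      have h2 := hi.2
      rw [beq_iff_eq, hind0] at h2
      refine ⟨Int.natCast_nonneg i, by omega, by exact_mod_cast h2⟩
    · rintro ⟨h0, h1, h2⟩
      rw [hQ]
      refine List.mem_map.mpr ⟨v.toNat, ?_, by omega⟩
      rw [List.mem_filter, List.mem_range]
      refine ⟨by omega, ?_⟩
      rw [beq_iff_eq, hind0]
      have hc : ((v.toNat : Nat) : Int) = v := by omega
      rw [hc, h2]
      simp
  have hfuel : n.toNat < cardD n (fun _ => false) + (n.toNat + 1) := by omega
  have hc0 : ((cardD n (fun _ : Int => false) : Nat) : Int) = 0 := by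
    unfold cardD; simp
  have key := lockstep n E (apBuild data M).1 hn0 hE hadj (n.toNat + 1)
    (fun _ => false) Q (apBuild data M).2 (fun i => decide (0 ≤ i ∧ i < n)) 0
    hind0 hnodQ (by intro v _; rfl) hZ0 (by intro v; simp) hfuel
  rw [hc0] at key
  exact key
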